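-- pv_equiv track=rewrite | github.com/pypi-data/pypi-mirror-342 | packages/codeEditorSDK/codeeditorsdk-0.1.2.tar.gz/codeeditorsdk-0.1.2/src/codeEditorSDK/utils/indent.py | detect_indent
-- ===== SOURCE A (Python) =====
-- def detect_indent(line: str) -> str:
--     """Detect indentation characters at the beginning of a line"""
--     indent = []
--     for char in line:
--         if char in (' ', '\t'):
--             indent.append(char)
--         else:
--             break
--     return ''.join(indent)
-- ===== SOURCE B (Python) =====
-- def detect_indent(line: str) -> str:
--     """Detect indentation characters at the beginning of a line"""
--     stripped = line.lstrip(' \t')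
--     return line[: len(line) - len(stripped)]
-- ===== Notes on version B (the rewrite author's own statement) =====
-- stated objective: simpler
-- what changed: Replaces the char-by-char accumulate-and-break loop building a list joined at the end by a single lstrip of spaces and tabs plus one slice, with no explicit loop or accumulator.
import Mathlib
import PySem

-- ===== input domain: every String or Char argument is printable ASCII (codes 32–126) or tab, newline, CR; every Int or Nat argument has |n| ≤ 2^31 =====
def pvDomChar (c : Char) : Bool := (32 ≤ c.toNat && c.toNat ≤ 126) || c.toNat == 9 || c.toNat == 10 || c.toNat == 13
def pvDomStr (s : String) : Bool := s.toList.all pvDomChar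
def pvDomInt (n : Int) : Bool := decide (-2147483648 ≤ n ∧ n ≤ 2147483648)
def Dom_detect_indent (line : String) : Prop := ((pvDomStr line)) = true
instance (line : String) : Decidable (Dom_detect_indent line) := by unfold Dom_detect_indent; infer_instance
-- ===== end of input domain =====

-- B replaces A's char-by-char accumulate-and-break loop by lstrip of spaces and tabs and one slice (simpler).


-- ===== PORT A =====
-- the for-loop with break: recursion over the chars, accumulating the indent list
def detectIndentGo (acc : List Char) : List Char → List Char
  | [] => acc
  | c :: rest => if c = ' ' ∨ c = '\t' then detectIndentGo (acc ++ [c]) rest else acc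

def detect_indent (line : String) : String :=
  String.mk (detectIndentGo [] line.toList)   -- ''.join(indent)

-- ===== PORT B =====
-- stripped = line.lstrip(' \t') : drop the leading chars in {' ','\t'} (exact hand port of lstrip with a char set)
def detect_indent_alt (line : String) : String :=
  String.mk (PySem.List.slice line.toList none
    (some ((line.toList.length : Int)
      - ((line.toList.dropWhile (fun c => c == ' ' || c == '\t')).length : Int))))

-- ===== PRECONDITION & SPEC =====
def Spec_detect_indent (line : String) (out : String) : Prop := out = detect_indent_alt line
instance (line : String) (out : String) : Decidable (Spec_detect_indent line out) := by unfold Spec_detect_indent; infer_instance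

-- ===== CLAIM (what is proved, stated in full; the proofs are below) =====
def Claim_equal_detect_indent : Prop := ∀ (line : String), Dom_detect_indent line → Spec_detect_indent line (detect_indent line)

-- ===== LEMMAS AND PROOFS =====
theorem detectIndentGo_eq_takeWhile (l : List Char) : ∀ acc,
    detectIndentGo acc l = acc ++ l.takeWhile (fun c => c == ' ' || c == '\t') := by
  induction l with
  | nil => intro acc; simp [detectIndentGo]
  | cons c rest ih =>
    intro acc
    by_cases h : c = ' ' ∨ c = '\t'
    · have hb : (c == ' ' || c == '\t') = true := by
        rcases h with h | h <;> simp [h]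
      simp [detectIndentGo, h, List.takeWhile, hb, ih]
    · have hb : (c == ' ' || c == '\t') = false := by
        simp only [Bool.or_eq_false_iff, beq_eq_false_iff_ne]
        exact ⟨fun h1 => h (Or.inl h1), fun h2 => h (Or.inr h2)⟩
      simp [detectIndentGo, h, List.takeWhile, hb]

theorem take_sub_dropWhile (p : Char → Bool) (l : List Char) :
    l.take (l.length - (l.dropWhile p).length) = l.takeWhile p := by
  have hsum : (l.takeWhile p).length + (l.dropWhile p).length = l.length := by
    rw [← List.length_append, List.takeWhile_append_dropWhile]
  have hlen : l.length - (l.dropWhile p).length = (l.takeWhile p).length := by omega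
  rw [hlen]
  exact (List.prefix_iff_eq_take.mp (List.takeWhile_prefix p)).symm

-- ===== VERDICT (by name: the statement is the Claim_ definition above) =====
theorem detect_indent_spec : Claim_equal_detect_indent := by
  intro line _
  unfold Spec_detect_indent detect_indent detect_indent_alt
  have hle : ((line.toList.dropWhile (fun c => c == ' ' || c == '\t')).length : Int)
      ≤ (line.toList.length : Int) := by
    exact_mod_cast List.length_dropWhile_le _ _
  rw [detectIndentGo_eq_takeWhile, List.nil_append]
  have h0 : (0 : Int) ≤ (line.toList.length : Int)
      - ((line.toList.dropWhile (fun c => c == ' ' || c == '\t')).length : Int) := by omega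
  rw [PySem.List.slice_to _ h0]
  congr 1
  have : ((line.toList.length : Int)
      - ((line.toList.dropWhile (fun c => c == ' ' || c == '\t')).length : Int)).toNat
      = line.toList.length - (line.toList.dropWhile (fun c => c == ' ' || c == '\t')).length := by
    omega
  rw [this, take_sub_dropWhile]
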